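-- pv_equiv track=rewrite | github.com/EusebiuAndrei/si-homework-1st | ex9.py | who_cannot_watch_game
-- ===== SOURCE A (Python) =====
-- def who_cannot_watch_game(matrix):
--     people = []
--     for i in range(1, len(matrix)):
--         for j in range(0, len(matrix[i])):
--             tallest = max([matrix[x][j] for x in range(0, i)])
--             if matrix[i][j] <= tallest:
--                 people.append((i, j))
--
--     return people
-- ===== SOURCE B (Python) =====
-- def who_cannot_watch_game(matrix):
--     if not matrix:
--         return []
--     maxes = list(matrix[0])
--     people = []
--     for i, row in enumerate(matrix[1:], 1):
--         for j, v in enumerate(row):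
--             if v <= maxes[j]:
--                 people.append((i, j))
--             else:
--                 maxes[j] = v
--     return people
-- ===== Notes on version B (the rewrite author's own statement) =====
-- stated objective: faster
-- what changed: Replaces the per-cell recomputation of the column maximum (a list comprehension over all rows above, per cell) with a single per-column running-maximum array updated once per cell while scanning rows top to bottom.
import Mathlib
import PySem

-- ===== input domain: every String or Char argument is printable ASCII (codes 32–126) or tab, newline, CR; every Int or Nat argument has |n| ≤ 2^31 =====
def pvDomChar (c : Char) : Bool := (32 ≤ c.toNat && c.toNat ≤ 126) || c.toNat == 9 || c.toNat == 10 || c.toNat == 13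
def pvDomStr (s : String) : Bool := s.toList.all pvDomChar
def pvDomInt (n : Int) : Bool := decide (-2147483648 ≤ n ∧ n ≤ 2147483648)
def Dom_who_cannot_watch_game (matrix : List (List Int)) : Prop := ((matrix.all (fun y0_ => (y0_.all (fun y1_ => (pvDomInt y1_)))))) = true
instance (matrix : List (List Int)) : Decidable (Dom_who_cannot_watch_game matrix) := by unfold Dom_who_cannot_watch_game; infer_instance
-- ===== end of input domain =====

-- B replaces A's per-cell recomputation of the column maximum (a scan over all rows above,
-- per cell) with a per-column running-maximum array updated once per cell in a single
-- top-to-bottom pass (objective: faster).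

-- ===== PORT A =====
-- literal transliteration of A: for i in range(1, len(matrix)): for j in range(0, len(matrix[i])):
--   tallest = max([matrix[x][j] for x in range(0, i)]); if matrix[i][j] <= tallest: people.append((i, j))
def who_cannot_watch_game (matrix : List (List Int)) : List (Int × Int) :=
  (PySem.List.pyRange 1 (matrix.length : Int) 1).foldl
    (fun people i =>
      (PySem.List.pyRange 0 ((PySem.List.pyGetD matrix i []).length : Int) 1).foldl
        (fun people j =>
          let tallest := (PySem.List.max?
            ((PySem.List.pyRange 0 i 1).map
              (fun x => PySem.List.pyGetD (PySem.List.pyGetD matrix x []) j 0))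
            (fun y => y)).getD 0
          if PySem.List.pyGetD (PySem.List.pyGetD matrix i []) j 0 ≤ tallest then
            people ++ [(i, j)]
          else people)
        people)
    []

-- ===== PORT B =====
-- literal transliteration of Source B: maxes = list(matrix[0]); for i, row in enumerate(matrix[1:], 1):
--   for j, v in enumerate(row): if v <= maxes[j]: people.append((i, j)) else: maxes[j] = v
def who_cannot_watch_game_alt (matrix : List (List Int)) : List (Int × Int) :=
  match matrix with
  | [] => []
  | r0 :: rest =>
    ((PySem.List.enumerate rest 1).foldl
      (fun (st : List Int × List (Int × Int)) p =>
        (PySem.List.enumerate p.2 0).foldl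
          (fun (st : List Int × List (Int × Int)) q =>
            if q.2 ≤ PySem.List.pyGetD st.1 q.1 0 then
              (st.1, st.2 ++ [(p.1, q.1)])
            else
              (PySem.List.pySetD st.1 q.1 q.2, st.2))
          st)
      (r0, [])).2

-- ===== PRECONDITION & SPEC =====
-- Pre_ excludes exactly the ragged matrices in which some row is longer than an earlier row:
-- on those A's comprehension max([matrix[x][j] for x in range(0, i)]) raises IndexError, so
-- A returns on no input outside Pre_.
def Pre_who_cannot_watch_game (matrix : List (List Int)) : Prop :=
  matrix.Pairwise (fun r s => s.length ≤ r.length)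
instance (matrix : List (List Int)) : Decidable (Pre_who_cannot_watch_game matrix) := by
  unfold Pre_who_cannot_watch_game; infer_instance
def pvWitness_who_cannot_watch_game : List (List Int) := [[3, 2], [1, 2], [3, 0]]

def Spec_who_cannot_watch_game (matrix : List (List Int)) (out : List (Int × Int)) : Prop := out = who_cannot_watch_game_alt matrix
instance (matrix : List (List Int)) (out : List (Int × Int)) : Decidable (Spec_who_cannot_watch_game matrix out) := by unfold Spec_who_cannot_watch_game; infer_instance

-- ===== CLAIM (what is proved, stated in full; the proofs are below) =====
def Claim_equal_who_cannot_watch_game : Prop := ∀ (matrix : List (List Int)), Dom_who_cannot_watch_game matrix → Pre_who_cannot_watch_game matrix → Spec_who_cannot_watch_game matrix (who_cannot_watch_game matrix)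

-- ===== LEMMAS AND PROOFS =====

theorem pyGetD_pySetD_ne (m : List Int) (n j : Nat) (v : Int) (h : j ≠ n) :
    PySem.List.pyGetD (PySem.List.pySetD m (n : Int) v) (j : Int) 0 = PySem.List.pyGetD m (j : Int) 0 := by
  by_cases hn : n < m.length
  · rw [PySem.List.pyGetD_pySetD_natCast m n j v 0 hn]
    simp [h]
  · have he : PySem.List.pySetD m (n : Int) v = m := by
      unfold PySem.List.pySetD
      rw [(PySem.List.pySet?_eq_none_iff m (n : Int) v).mpr]
      · rfl
      · simp [PySem.Raise.InRange]
        omega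
    rw [he]

theorem pyGetD_pySetD_self (m : List Int) (n : Nat) (v : Int) (hn : n < m.length) :
    PySem.List.pyGetD (PySem.List.pySetD m (n : Int) v) (n : Int) 0 = v := by
  rw [PySem.List.pyGetD_pySetD_natCast m n n v 0 hn]; simp

def updFrom (m : List Int) (row : List Int) (s : Nat) : List Int :=
  match row with
  | [] => m
  | v :: t =>
    updFrom (if v ≤ PySem.List.pyGetD m (s : Int) 0 then m else PySem.List.pySetD m (s : Int) v) t (s + 1)

theorem updFrom_length (row : List Int) : ∀ (m : List Int) (s : Nat),
    (updFrom m row s).length = m.length := by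
  induction row with
  | nil => intro m s; rfl
  | cons v t ih =>
    intro m s
    rw [updFrom, ih]
    split <;> simp

theorem updFrom_get_lt (row : List Int) : ∀ (m : List Int) (s j : Nat), j < s →
    PySem.List.pyGetD (updFrom m row s) (j : Int) 0 = PySem.List.pyGetD m (j : Int) 0 := by
  induction row with
  | nil => intro m s j _; rfl
  | cons v t ih =>
    intro m s j hj
    rw [updFrom, ih _ _ _ (by omega)]
    split
    · rfl
    · exact pyGetD_pySetD_ne m s j v (by omega)

theorem pyGetD_cons_succ (v : Int) (t : List Int) (k : Nat) :
    PySem.List.pyGetD (v :: t) ((k+1 : Nat) : Int) 0 = PySem.List.pyGetD t (k : Int) 0 := by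
  rw [PySem.List.pyGetD_natCast, PySem.List.pyGetD_natCast]
  simp [List.getD]

theorem updFrom_get (row : List Int) : ∀ (s : Nat) (m : List Int) (j : Nat),
    j < row.length → s + row.length ≤ m.length →
    PySem.List.pyGetD (updFrom m row s) ((s + j : Nat) : Int) 0 =
      max (PySem.List.pyGetD m ((s + j : Nat) : Int) 0) (PySem.List.pyGetD row (j : Int) 0) := by
  induction row with
  | nil => intro s m j hj _; simp at hj
  | cons v t ih =>
    intro s m j hj hlen
    rw [updFrom]
    have hs : s < m.length := by simp at hlen; omega
    match j, hj with
    | 0, _ =>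
      rw [updFrom_get_lt t _ _ _ (by omega)]
      simp only [Nat.add_zero, Nat.cast_zero, PySem.List.pyGetD_zero_cons]
      split
      · omega
      · rw [pyGetD_pySetD_self m s v hs]
        omega
    | (k+1), hj2 =>
      have hk : k < t.length := by simp at hj2; omega
      have hlen' : (s+1) + t.length ≤ (if v ≤ PySem.List.pyGetD m (s : Int) 0 then m else PySem.List.pySetD m (s : Int) v).length := by
        split
        · simp at hlen; omega
        · rw [PySem.List.length_pySetD]; simp at hlen; omega
      have hidx : (s + (k+1) : Nat) = ((s+1) + k : Nat) := by omega
      rw [hidx, ih (s+1) _ k hk hlen']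
      have hne : PySem.List.pyGetD (if v ≤ PySem.List.pyGetD m (s : Int) 0 then m else PySem.List.pySetD m (s : Int) v) (((s+1) + k : Nat) : Int) 0 = PySem.List.pyGetD m (((s+1) + k : Nat) : Int) 0 := by
        split
        · rfl
        · exact pyGetD_pySetD_ne m s ((s+1)+k) v (by omega)
      rw [hne, pyGetD_cons_succ]

def hits (m : List Int) (row : List Int) (s : Nat) (i : Int) : List (Int × Int) :=
  match row with
  | [] => []
  | v :: t =>
    if v ≤ PySem.List.pyGetD m (s : Int) 0 then ((i, (s : Int)) :: hits m t (s + 1) i)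
    else hits (PySem.List.pySetD m (s : Int) v) t (s + 1) i

def colMax (m : List Int) (rows : List (List Int)) : List Int :=
  rows.foldl (fun m r => updFrom m r 0) m

-- B's inner loop in canonical form
theorem B_inner (i : Int) (row : List Int) : ∀ (s : Nat) (m : List Int) (ps : List (Int × Int)),
    (PySem.List.enumerate row ((s : Nat) : Int)).foldl
      (fun (st : List Int × List (Int × Int)) q =>
        if q.2 ≤ PySem.List.pyGetD st.1 q.1 0 then (st.1, st.2 ++ [(i, q.1)])
        else (PySem.List.pySetD st.1 q.1 q.2, st.2)) (m, ps)
    = (updFrom m row s, ps ++ hits m row s i) := by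
  induction row with
  | nil => intro s m ps; simp [PySem.List.enumerate_nil, hits, updFrom]
  | cons v t ih =>
    intro s m ps
    rw [PySem.List.enumerate_cons]
    simp only [List.foldl_cons]
    rw [hits, updFrom]
    by_cases hle : v ≤ PySem.List.pyGetD m (s : Int) 0
    · simp only [hle, if_pos]
      have : ((s : Int) + 1) = ((s+1 : Nat) : Int) := by push_cast; ring
      rw [this, ih (s+1) m (ps ++ [(i, (s:Int))])]
      simp
    · simp only [hle, if_false]
      have : ((s : Int) + 1) = ((s+1 : Nat) : Int) := by push_cast; ring
      rw [this, ih (s+1) (PySem.List.pySetD m (s : Int) v) ps]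

-- A's inner loop (over the same enumerated row, tallest read off a fixed function g)
-- equals the hits of B's maxes array, provided g agrees with the array on the row's columns
theorem hits_eq_Afold (i : Int) (row : List Int) : ∀ (s : Nat) (m : List Int) (g : Int → Int)
    (acc : List (Int × Int)),
    (∀ k : Nat, k < row.length → g ((s + k : Nat) : Int) = PySem.List.pyGetD m ((s + k : Nat) : Int) 0) →
    (PySem.List.enumerate row ((s : Nat) : Int)).foldl
      (fun acc q => if q.2 ≤ g q.1 then acc ++ [(i, q.1)] else acc) acc
    = acc ++ hits m row s i := by
  induction row with
  | nil => intro s m g acc _; simp [PySem.List.enumerate_nil, hits]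
  | cons v t ih =>
    intro s m g acc hg
    rw [PySem.List.enumerate_cons]
    simp only [List.foldl_cons]
    rw [hits]
    have hg0 : g ((s : Nat) : Int) = PySem.List.pyGetD m ((s : Nat) : Int) 0 := by
      simpa using hg 0 (by simp)
    have hcast : ((s : Int) + 1) = ((s+1 : Nat) : Int) := by push_cast; ring
    by_cases hle : v ≤ PySem.List.pyGetD m (s : Int) 0
    · rw [if_pos (by rw [hg0]; exact hle), if_pos hle]
      rw [hcast, ih (s+1) m g (acc ++ [(i, (s:Int))])
        (by intro k hk
            have := hg (k+1) (by simpa using hk)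
            have e : (s + (k+1) : Nat) = ((s+1) + k : Nat) := by omega
            rwa [e] at this)]
      simp
    · rw [if_neg (by rw [hg0]; exact hle), if_neg hle]
      rw [hcast, ih (s+1) (PySem.List.pySetD m (s : Int) v) g acc]
      intro k hk
      have := hg (k+1) (by simpa using hk)
      have e : (s + (k+1) : Nat) = ((s+1) + k : Nat) := by omega
      rw [e] at this
      rw [this]
      exact (pyGetD_pySetD_ne m s ((s+1)+k) v (by omega)).symm

theorem colMax_get (rows : List (List Int)) : ∀ (m : List Int) (j : Nat),
    j < m.length → (∀ r ∈ rows, r.length ≤ m.length ∧ j < r.length) →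
    PySem.List.pyGetD (colMax m rows) (j : Int) 0 =
      (rows.map (fun r => PySem.List.pyGetD r (j : Int) 0)).foldl max (PySem.List.pyGetD m (j : Int) 0) := by
  induction rows with
  | nil => intro m j _ _; simp [colMax]
  | cons r rs ih =>
    intro m j hj hr
    have h1 := hr r (by simp)
    have hupd : PySem.List.pyGetD (updFrom m r 0) (j : Int) 0 =
        max (PySem.List.pyGetD m (j : Int) 0) (PySem.List.pyGetD r (j : Int) 0) := by
      have := updFrom_get r 0 m j h1.2 (by omega)
      simpa using this
    have : colMax m (r :: rs) = colMax (updFrom m r 0) rs := by simp [colMax]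
    rw [this, ih (updFrom m r 0) j (by rw [updFrom_length]; omega)
      (by intro r' hr'; have := hr r' (by simp [hr']); rw [updFrom_length]; exact this)]
    rw [hupd]
    simp

theorem B_inner0 (i : Int) (row : List Int) (m : List Int) (ps : List (Int × Int)) :
    (PySem.List.enumerate row 0).foldl
      (fun (st : List Int × List (Int × Int)) q =>
        if q.2 ≤ PySem.List.pyGetD st.1 q.1 0 then (st.1, st.2 ++ [(i, q.1)])
        else (PySem.List.pySetD st.1 q.1 q.2, st.2)) (m, ps)
    = (updFrom m row 0, ps ++ hits m row 0 i) := by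
  simpa using B_inner i row 0 m ps

-- the first component of B's outer fold is the running column-max array
theorem B_outer_fst (rows : List (List Int)) : ∀ (s : Int) (m : List Int) (ps : List (Int × Int)),
    ((PySem.List.enumerate rows s).foldl
      (fun (st : List Int × List (Int × Int)) p =>
        (PySem.List.enumerate p.2 0).foldl
          (fun (st : List Int × List (Int × Int)) q =>
            if q.2 ≤ PySem.List.pyGetD st.1 q.1 0 then (st.1, st.2 ++ [(p.1, q.1)])
            else (PySem.List.pySetD st.1 q.1 q.2, st.2)) st) (m, ps)).1
    = colMax m rows := by
  induction rows with
  | nil => intro s m ps; simp [PySem.List.enumerate_nil, colMax]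
  | cons r rs ih =>
    intro s m ps
    rw [PySem.List.enumerate_cons]
    simp only [List.foldl_cons]
    rw [B_inner0 s r m ps]
    rw [ih (s+1) (updFrom m r 0) (ps ++ hits m r 0 s)]
    simp [colMax]

theorem pyGetD_append_left {α : Type} (xs ys : List α) (i : Int) (d : α)
    (h0 : 0 ≤ i) (h : i < (xs.length : Int)) :
    PySem.List.pyGetD (xs ++ ys) i d = PySem.List.pyGetD xs i d := by
  rw [PySem.List.pyGetD_eq_getElem (xs ++ ys) d h0 (by simp; omega),
      PySem.List.pyGetD_eq_getElem xs d h0 h]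
  exact List.getElem_append_left (by omega)

theorem pyGetD_append_last {α : Type} (xs : List α) (y : α) (d : α) :
    PySem.List.pyGetD (xs ++ [y]) ((xs.length : Nat) : Int) d = y := by
  rw [PySem.List.pyGetD_natCast]
  simp [List.getD]

theorem take_map_pyRange (matrix : List (List Int)) (k : Nat) (hk : k ≤ matrix.length) :
    (PySem.List.pyRange 0 (k : Int) 1).map (fun x => PySem.List.pyGetD matrix x ([] : List Int))
      = matrix.take k := by
  induction k with
  | zero => simp [PySem.List.pyRange_one_eq_nil]
  | succ n ih =>
    have hc : ((n+1 : Nat) : Int) = ((n : Nat) : Int) + 1 := by push_cast; ring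
    rw [hc, PySem.List.pyRange_one_succ_right (by positivity)]
    rw [List.map_append, ih (by omega)]
    simp only [List.map_cons, List.map_nil]
    rw [List.take_add_one]
    congr 1
    rw [PySem.List.pyGetD_natCast]
    have : n < matrix.length := by omega
    simp [List.getD, List.getElem?_eq_getElem this]

theorem hits_eq_Afold0 (i : Int) (row : List Int) (m : List Int) (g : Int → Int)
    (acc : List (Int × Int))
    (hg : ∀ k : Nat, k < row.length → g (k : Int) = PySem.List.pyGetD m (k : Int) 0) :
    (PySem.List.enumerate row 0).foldl
      (fun acc q => if q.2 ≤ g q.1 then acc ++ [(i, q.1)] else acc) acc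
    = acc ++ hits m row 0 i := by
  simpa using hits_eq_Afold i row 0 m g acc (by simpa using hg)

theorem tallest_eq (matrix : List (List Int)) (k' : Nat) (hk : k' ≤ matrix.length) (j : Int) :
    (PySem.List.pyRange 0 (k' : Int) 1).map
      (fun x => PySem.List.pyGetD (PySem.List.pyGetD matrix x ([] : List Int)) j 0)
    = (matrix.take k').map (fun r => PySem.List.pyGetD r j 0) := by
  rw [← take_map_pyRange matrix k' hk, List.map_map]
  rfl

def Abody (matrix : List (List Int)) (people : List (Int × Int)) (i : Int) : List (Int × Int) :=
  (PySem.List.pyRange 0 ((PySem.List.pyGetD matrix i []).length : Int) 1).foldl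
    (fun people j =>
      let tallest := (PySem.List.max?
        ((PySem.List.pyRange 0 i 1).map
          (fun x => PySem.List.pyGetD (PySem.List.pyGetD matrix x []) j 0))
        (fun y => y)).getD 0
      if PySem.List.pyGetD (PySem.List.pyGetD matrix i []) j 0 ≤ tallest then
        people ++ [(i, j)]
      else people)
    people

theorem A_eq (matrix : List (List Int)) :
    who_cannot_watch_game matrix
      = (PySem.List.pyRange 1 (matrix.length : Int) 1).foldl (Abody matrix) [] := rfl

theorem Abody_congr (matrix' : List (List Int)) (lr : List Int) (i : Int)
    (h0 : 0 ≤ i) (hi : i < (matrix'.length : Int)) (acc : List (Int × Int)) :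
    Abody (matrix' ++ [lr]) acc i = Abody matrix' acc i := by
  unfold Abody
  simp only [pyGetD_append_left matrix' [lr] i ([] : List Int) h0 hi]
  apply PySem.List.foldl_congr_mem
  intro acc2 j hj
  have hmap : (PySem.List.pyRange 0 i 1).map
      (fun x => PySem.List.pyGetD (PySem.List.pyGetD (matrix' ++ [lr]) x ([] : List Int)) j 0)
      = (PySem.List.pyRange 0 i 1).map
      (fun x => PySem.List.pyGetD (PySem.List.pyGetD matrix' x ([] : List Int)) j 0) := by
    apply List.map_congr_left
    intro x hx
    rw [PySem.List.mem_pyRange_one] at hx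
    rw [pyGetD_append_left matrix' [lr] x ([] : List Int) hx.1 (by omega)]
  simp only [hmap]

theorem main_aux (r0 : List Int) (rest : List (List Int)) :
    (r0 :: rest).Pairwise (fun r s => s.length ≤ r.length) →
    who_cannot_watch_game (r0 :: rest) = who_cannot_watch_game_alt (r0 :: rest) := by
  induction rest using List.reverseRecOn with
  | nil =>
    intro _
    simp [who_cannot_watch_game, who_cannot_watch_game_alt,
      PySem.List.pyRange_one_eq_nil, PySem.List.enumerate_nil]
  | append_singleton rs lr ih =>
    intro hpre
    have hcons : r0 :: (rs ++ [lr]) = (r0 :: rs) ++ [lr] := by simp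
    have hpre' : (r0 :: rs).Pairwise (fun r s => s.length ≤ r.length) := by
      refine List.Pairwise.sublist ?_ (hcons ▸ hpre)
      exact List.sublist_append_left (r0 :: rs) [lr]
    have hall : ∀ r ∈ r0 :: rs, lr.length ≤ r.length := by
      have := (List.pairwise_append.mp (hcons ▸ hpre)).2.2
      intro r hr
      exact this r hr lr (by simp)
    have hB : who_cannot_watch_game_alt (r0 :: (rs ++ [lr])) =
        who_cannot_watch_game_alt (r0 :: rs) ++
          hits (colMax r0 rs) lr 0 (1 + (rs.length : Int)) := by
      rw [who_cannot_watch_game_alt, who_cannot_watch_game_alt]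
      rw [PySem.List.enumerate_append]
      have h1 : PySem.List.enumerate [lr] (1 + (rs.length : Int)) = [((1 + (rs.length : Int)), lr)] := by
        rw [PySem.List.enumerate_cons, PySem.List.enumerate_nil]
      rw [h1, List.foldl_append, List.foldl_cons, List.foldl_nil]
      have hst : (List.foldl
          (fun (st : List Int × List (Int × Int)) p =>
            (PySem.List.enumerate p.2 0).foldl
              (fun (st : List Int × List (Int × Int)) q =>
                if q.2 ≤ PySem.List.pyGetD st.1 q.1 0 then (st.1, st.2 ++ [(p.1, q.1)])
                else (PySem.List.pySetD st.1 q.1 q.2, st.2)) st)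
          (r0, []) (PySem.List.enumerate rs 1)).1 = colMax r0 rs := B_outer_fst rs 1 r0 []
      generalize hgen : (List.foldl
          (fun (st : List Int × List (Int × Int)) p =>
            (PySem.List.enumerate p.2 0).foldl
              (fun (st : List Int × List (Int × Int)) q =>
                if q.2 ≤ PySem.List.pyGetD st.1 q.1 0 then (st.1, st.2 ++ [(p.1, q.1)])
                else (PySem.List.pySetD st.1 q.1 q.2, st.2)) st)
          (r0, []) (PySem.List.enumerate rs 1)) = st at hst ⊢
      obtain ⟨m1, ps1⟩ := st
      simp only at hst ⊢
      rw [B_inner0 (1 + (rs.length : Int)) lr m1 ps1]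
      simp [hst]
    have hidx : (1 + (rs.length : Int)) = (((r0 :: rs).length : Nat) : Int) := by
      simp
      omega
    have hA : who_cannot_watch_game (r0 :: (rs ++ [lr])) =
        who_cannot_watch_game (r0 :: rs) ++
          hits (colMax r0 rs) lr 0 (1 + (rs.length : Int)) := by
      rw [hcons, A_eq, A_eq]
      have hlen1 : ((((r0 :: rs) ++ [lr]).length : Nat) : Int) = (1 + (rs.length : Int)) + 1 := by
        simp
        omega
      rw [hlen1, PySem.List.pyRange_one_succ_right (by omega)]
      rw [List.foldl_append, List.foldl_cons, List.foldl_nil]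
      have hpref : ∀ acc, (PySem.List.pyRange 1 (1 + (rs.length : Int)) 1).foldl
          (Abody ((r0 :: rs) ++ [lr])) acc
          = (PySem.List.pyRange 1 (((r0 :: rs).length : Nat) : Int) 1).foldl (Abody (r0 :: rs)) acc := by
        intro acc
        rw [← hidx]
        apply PySem.List.foldl_congr_mem
        intro acc2 x hx
        rw [PySem.List.mem_pyRange_one] at hx
        exact Abody_congr (r0 :: rs) lr x (by omega) (by simp; omega) acc2
      rw [hpref]
      have hlast : ∀ acc, Abody ((r0 :: rs) ++ [lr]) acc (1 + (rs.length : Int)) =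
          acc ++ hits (colMax r0 rs) lr 0 (1 + (rs.length : Int)) := by
        intro acc
        unfold Abody
        rw [hidx]
        simp only [pyGetD_append_last (r0 :: rs) lr ([] : List Int)]
        have hg : ∀ k : Nat, k < lr.length →
            (fun j => (PySem.List.max?
              ((PySem.List.pyRange 0 ((((r0 :: rs).length : Nat)) : Int) 1).map
                (fun x => PySem.List.pyGetD (PySem.List.pyGetD ((r0 :: rs) ++ [lr]) x ([] : List Int)) j 0))
              (fun y => y)).getD 0) (k : Int)
            = PySem.List.pyGetD (colMax r0 rs) (k : Int) 0 := by
          intro k hk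
          simp only []
          rw [tallest_eq ((r0 :: rs) ++ [lr]) ((r0 :: rs).length) (by simp) (k : Int)]
          rw [List.take_left]
          rw [List.map_cons, PySem.List.max?_id_cons]
          simp only [Option.getD_some]
          rw [colMax_get rs r0 k (by have := hall r0 (by simp); omega)
            (by intro r hr
                refine ⟨(List.pairwise_cons.mp hpre').1 r hr, ?_⟩
                have := hall r (by simp [hr]); omega)]
        have h := hits_eq_Afold0 ((((r0 :: rs).length : Nat)) : Int) lr (colMax r0 rs)
          (fun j => (PySem.List.max?
              ((PySem.List.pyRange 0 ((((r0 :: rs).length : Nat)) : Int) 1).map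
                (fun x => PySem.List.pyGetD (PySem.List.pyGetD ((r0 :: rs) ++ [lr]) x ([] : List Int)) j 0))
              (fun y => y)).getD 0) acc hg
        rw [PySem.List.enumerate_eq_map_pyRange lr 0, List.foldl_map] at h
        simp only [PySem.List.len_eq] at h
        simpa using h
      rw [hlast]
    rw [hA, hB, ih hpre']

-- ===== VERDICT (by name: the statement is the Claim_ definition above) =====
theorem who_cannot_watch_game_spec : Claim_equal_who_cannot_watch_game := by
  intro matrix _ hpre
  unfold Spec_who_cannot_watch_game
  cases matrix with
  | nil => rfl
  | cons r0 rest => exact main_aux r0 rest hpre
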